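-- pv_equiv track=rewrite | github.com/saraxmartin/Image-Captioning | utils/train_test.py | clean_lists
-- ===== SOURCE A (Python) =====
-- def clean_lists(pred, gt):
--     cleaned_pred = []
--     cleaned_gt = []
--     for p, g in zip(pred, gt):
--         # Remove <SOS>, <EOS>, and <PAD> from gt
--         g_cleaned = [word for word in g if word not in ('<SOS>', '<EOS>', '<PAD>')]
--         # Find indices to retain in pred
--         retain_indices = [i for i, word in enumerate(g) if word not in ('<SOS>', '<EOS>', '<PAD>')]
--         # Filter pred based on retain indices
--         p_cleaned = [p[i] for i in retain_indices]
--
--         # Append cleaned lists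
--         cleaned_gt.append(g_cleaned)
--         cleaned_pred.append(p_cleaned)
--
--     return cleaned_pred, cleaned_gt
-- ===== SOURCE B (Python) =====
-- SPECIAL = ('<SOS>', '<EOS>', '<PAD>')
--
-- def _clean_pair(p, g):
--     # structural recursion consuming the heads of p and g in lockstep:
--     # no index table, no enumerate, no p[i]
--     if not g:
--         return [], []
--     kept_p, kept_g = _clean_pair(p[1:], g[1:])
--     if g[0] in SPECIAL:
--         return kept_p, kept_g
--     return [p[0]] + kept_p, [g[0]] + kept_g
--
-- def clean_lists(pred, gt):
--     pairs = [_clean_pair(p, g) for p, g in zip(pred, gt)]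
--     return [kept_p for kept_p, _ in pairs], [kept_g for _, kept_g in pairs]
-- ===== Notes on version B (the rewrite author's own statement) =====
-- stated objective: alternative
-- what changed: A builds a retain_indices table and makes three indexed passes per sentence (filter, enumerate-filter, p[i] map); B replaces indexing entirely by a structural recursion that consumes the heads of p and g in lockstep and conses the kept pair onto the recursive result, with the outer loop a single map over zip.
import Mathlib
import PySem

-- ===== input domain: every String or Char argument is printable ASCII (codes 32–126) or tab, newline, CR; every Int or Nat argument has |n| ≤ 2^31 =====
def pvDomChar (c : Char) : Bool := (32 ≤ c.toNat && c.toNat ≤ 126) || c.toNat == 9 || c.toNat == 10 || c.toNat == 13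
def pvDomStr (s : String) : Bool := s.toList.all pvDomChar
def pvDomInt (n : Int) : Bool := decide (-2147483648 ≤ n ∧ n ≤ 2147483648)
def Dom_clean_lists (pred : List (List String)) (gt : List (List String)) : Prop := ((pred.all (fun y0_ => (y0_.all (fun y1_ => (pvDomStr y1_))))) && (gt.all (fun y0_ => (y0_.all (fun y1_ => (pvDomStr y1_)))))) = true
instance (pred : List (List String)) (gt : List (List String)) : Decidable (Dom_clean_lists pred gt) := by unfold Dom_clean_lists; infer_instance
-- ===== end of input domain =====

-- B replaces A's retain_indices table and indexed lookups by a structural recursion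
-- consuming the heads of p and g in lockstep (alternative decomposition; return value only).

-- shared token predicate: word in ('<SOS>', '<EOS>', '<PAD>')
def pvSpecial (w : String) : Bool := w == "<SOS>" || w == "<EOS>" || w == "<PAD>"

-- ===== PORT A =====
-- A's comprehension g_cleaned (named helper, same computation)
def pvACleanG (g : List String) : List String := g.filter (fun word => !pvSpecial word)
-- A's retain_indices comprehension followed by the p[i] comprehension (p[i] is pyGetD, in range under Pre_)
def pvACleanP (p : List String) (g : List String) : List String :=
  (((PySem.List.enumerate g 0).filter (fun iw => !pvSpecial iw.2)).map (·.1)).map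
    (fun i => PySem.List.pyGetD p i "")

-- literal transliteration of A: one loop over zip(pred, gt), appending the two cleaned lists
def clean_lists (pred : List (List String)) (gt : List (List String)) : List (List String) × List (List String) :=
  let r := (List.zip pred gt).foldl
    (fun (acc : List (List String) × List (List String)) pg =>
      (acc.1 ++ [pvACleanP pg.1 pg.2], acc.2 ++ [pvACleanG pg.2]))
    ([], [])
  (r.1, r.2)

-- ===== PORT B =====
-- B's _clean_pair: structural recursion, consuming g's head and p[1:] in lockstep;
-- p[0] is pyGetD p 0 (in range under Pre_), p[1:] is PySem.List.slice p 1 none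
def pvCleanPair : List String → List String → List String × List String
  | _, [] => ([], [])
  | p, w :: grest =>
    let r := pvCleanPair (PySem.List.slice p (some 1) none) grest
    if pvSpecial w then r
    else (PySem.List.pyGetD p 0 "" :: r.1, w :: r.2)

-- literal transliteration of B: map _clean_pair over zip, then project the two components
def clean_lists_alt (pred : List (List String)) (gt : List (List String)) : List (List String) × List (List String) :=
  let pairs := (List.zip pred gt).map (fun pg => pvCleanPair pg.1 pg.2)
  (pairs.map (·.1), pairs.map (·.2))

-- ===== PRECONDITION & SPEC =====
-- Pre_ excludes exactly the inputs where Python A raises IndexError (some retained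
-- gt index is out of range of the paired pred sentence); Python B raises there too.
def Pre_clean_lists (pred : List (List String)) (gt : List (List String)) : Prop :=
  ∀ pg ∈ List.zip pred gt, ∀ iw ∈ PySem.List.enumerate pg.2 0,
    pvSpecial iw.2 = true ∨ iw.1 < (pg.1.length : Int)
instance (pred : List (List String)) (gt : List (List String)) : Decidable (Pre_clean_lists pred gt) := by unfold Pre_clean_lists; infer_instance

def pvWitness_clean_lists : List (List String) × List (List String) :=
  ([["the", "cat", "sat"], ["a", "b"]], [["<SOS>", "the", "<EOS>"], ["x", "<PAD>"]])

def Spec_clean_lists (pred : List (List String)) (gt : List (List String)) (out : List (List String) × List (List String)) : Prop := out = clean_lists_alt pred gt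
instance (pred : List (List String)) (gt : List (List String)) (out : List (List String) × List (List String)) : Decidable (Spec_clean_lists pred gt out) := by unfold Spec_clean_lists; infer_instance

-- ===== CLAIM =====
def Claim_equal_clean_lists : Prop := ∀ (pred : List (List String)) (gt : List (List String)), Dom_clean_lists pred gt → Pre_clean_lists pred gt → Spec_clean_lists pred gt (clean_lists pred gt)

-- ===== LEMMAS AND PROOFS =====

-- enumerate with a shifted start is a shift of enumerate
theorem pv_enumerate_shift {α : Type} (xs : List α) : ∀ (s : Int),
    PySem.List.enumerate xs (s + 1) = (PySem.List.enumerate xs s).map (fun iw => (iw.1 + 1, iw.2)) := by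
  induction xs with
  | nil => intro s; simp [PySem.List.enumerate_nil]
  | cons x rest ih =>
    intro s
    rw [PySem.List.enumerate_cons, PySem.List.enumerate_cons, List.map_cons, ih (s + 1)]

-- indexing p at i+1 is indexing p.tail at i, for a natural i
theorem pv_pyGetD_succ_tail (p : List String) (k : Nat) (d : String) :
    PySem.List.pyGetD p ((k : Int) + 1) d = PySem.List.pyGetD p.tail (k : Int) d := by
  have h : ((k : Int) + 1) = (((k + 1 : Nat) : Int)) := by push_cast; ring
  rw [h, PySem.List.pyGetD_natCast, PySem.List.pyGetD_natCast]
  cases p <;> simp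

-- shifting the enumeration start by one is indexing the tail
theorem pv_AP_shift (p rest : List String) :
    (((PySem.List.enumerate rest 1).filter (fun iw => !pvSpecial iw.2)).map (·.1)).map
        (fun i => PySem.List.pyGetD p i "")
      = (((PySem.List.enumerate rest 0).filter (fun iw => !pvSpecial iw.2)).map (·.1)).map
        (fun i => PySem.List.pyGetD p.tail i "") := by
  rw [show (1 : Int) = 0 + 1 by ring, pv_enumerate_shift]
  have hfc : (List.map (fun iw => (iw.1 + 1, iw.2)) (PySem.List.enumerate rest 0)).filter
        (fun iw => !pvSpecial iw.2)
      = List.map (fun iw => (iw.1 + 1, iw.2))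
        ((PySem.List.enumerate rest 0).filter (fun iw => !pvSpecial iw.2)) := by
    rw [List.filter_map]
    congr 1
  rw [hfc, List.map_map, List.map_map, List.map_map]
  apply List.map_congr_left
  intro iw hmem
  have hmem' : iw ∈ PySem.List.enumerate rest 0 := List.mem_of_mem_filter hmem
  obtain ⟨k, hk, hiw⟩ := (PySem.List.mem_enumerate_iff _ _ _).1 hmem'
  have hk1 : iw.1 = (k : Int) := by rw [hiw]; simp
  show PySem.List.pyGetD p (iw.1 + 1) "" = PySem.List.pyGetD p.tail iw.1 ""
  rw [hk1]
  exact pv_pyGetD_succ_tail p k ""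

-- A's per-sentence comprehensions equal B's head-consuming recursion,
-- given that every retained index is in range of p
theorem pv_pair_eq : ∀ (g p : List String),
    (∀ iw ∈ PySem.List.enumerate g 0, pvSpecial iw.2 = true ∨ iw.1 < (p.length : Int)) →
    pvCleanPair p g = (pvACleanP p g, pvACleanG g) := by
  intro g
  induction g with
  | nil => intro p _; simp [pvCleanPair, pvACleanP, pvACleanG, PySem.List.enumerate_nil]
  | cons w rest ih =>
    intro p hpre
    have h0 : (0 : Int) + 1 = 1 := by ring
    have hshift := pv_enumerate_shift rest 0
    rw [h0] at hshift
    -- transported precondition for the tail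
    have hpre' : ∀ iw ∈ PySem.List.enumerate rest 0,
        pvSpecial iw.2 = true ∨ iw.1 < (p.tail.length : Int) := by
      intro iw hm
      obtain ⟨k, hk, hiw⟩ := (PySem.List.mem_enumerate_iff _ _ _).1 hm
      have hm1 : (iw.1 + 1, iw.2) ∈ PySem.List.enumerate (w :: rest) 0 := by
        rw [PySem.List.enumerate_cons, h0, hshift]
        exact List.mem_cons_of_mem _ (List.mem_map.2 ⟨iw, hm, rfl⟩)
      rcases hpre _ hm1 with h | h
      · exact Or.inl h
      · right
        have hk1 : iw.1 = (k : Int) := by rw [hiw]; simp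
        cases p with
        | nil => exfalso; simp at h; omega
        | cons x xs => simp at h ⊢; omega
    have hrec := ih (PySem.List.slice p (some 1) none)
    rw [PySem.List.slice_from_one] at hrec
    have hrec' := hrec hpre'
    show pvCleanPair p (w :: rest) = _
    unfold pvCleanPair
    rw [PySem.List.slice_from_one, hrec']
    by_cases hw : pvSpecial w = true
    · rw [if_pos hw]
      refine Prod.ext ?_ ?_
      · show pvACleanP p.tail rest = pvACleanP p (w :: rest)
        unfold pvACleanP
        rw [PySem.List.enumerate_cons, h0, List.filter_cons, if_neg (by simp [hw]),
          pv_AP_shift]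
      · show pvACleanG rest = pvACleanG (w :: rest)
        unfold pvACleanG
        rw [List.filter_cons, if_neg (by simp [hw])]
    · simp only [Bool.not_eq_true] at hw
      rw [if_neg (by simp [hw])]
      refine Prod.ext ?_ ?_
      · show PySem.List.pyGetD p 0 "" :: pvACleanP p.tail rest = pvACleanP p (w :: rest)
        unfold pvACleanP
        rw [PySem.List.enumerate_cons, h0, List.filter_cons, if_pos (by simp [hw]),
          List.map_cons, List.map_cons, pv_AP_shift]
      · show w :: pvACleanG rest = pvACleanG (w :: rest)
        unfold pvACleanG
        rw [List.filter_cons, if_pos (by simp [hw])]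

-- A's append-accumulating fold over zip is a map over zip
theorem pv_foldl_pair_map {α β γ : Type} (f : α → List β) (h : α → List γ) :
    ∀ (l : List α) (a : List (List β)) (b : List (List γ)),
      l.foldl (fun acc x => (acc.1 ++ [f x], acc.2 ++ [h x])) (a, b)
        = (a ++ l.map f, b ++ l.map h) := by
  intro l
  induction l with
  | nil => intro a b; simp
  | cons x rest ih => intro a b; rw [List.foldl_cons, List.map_cons, List.map_cons, ih]; simp

-- ===== VERDICT =====
theorem clean_lists_spec : Claim_equal_clean_lists := by
  intro pred gt _ hpre
  unfold Spec_clean_lists clean_lists clean_lists_alt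
  rw [pv_foldl_pair_map (fun pg => pvACleanP pg.1 pg.2) (fun pg => pvACleanG pg.2)
        (List.zip pred gt) [] []]
  simp only [List.nil_append, List.map_map]
  refine Prod.ext ?_ ?_
  · apply List.map_congr_left
    intro pg hmem
    have hp := pv_pair_eq pg.2 pg.1 (hpre pg hmem)
    show pvACleanP pg.1 pg.2 = (pvCleanPair pg.1 pg.2).1
    rw [hp]
  · apply List.map_congr_left
    intro pg hmem
    have hp := pv_pair_eq pg.2 pg.1 (hpre pg hmem)
    show pvACleanG pg.2 = (pvCleanPair pg.1 pg.2).2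
    rw [hp]
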